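-- pv_equiv track=rewrite | github.com/dengjiangbin/deng-tool-rejoin | tests/test_bootstrap_dash_reexec.py | _strip_comments_and_heredocs
-- ===== SOURCE A (Python) =====
-- def _strip_comments_and_heredocs(script: str) -> str:
--     """Return ``script`` with comment lines and ``DENG_REJOIN_WRAPPER``
--     heredoc bodies removed.
--
--     The wrapper body is a separate ``sh`` script written verbatim to
--     disk; the outer installer treats it as opaque text.  Forbidden
--     tokens there are not parsed by the outer dash and would only
--     create false positives.
--     """
--     out: list[str] = []
--     in_wrapper = False
--     for line in script.splitlines():
--         s = line.lstrip()
--         if in_wrapper: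
--             if s == "DENG_REJOIN_WRAPPER":
--                 in_wrapper = False
--             continue
--         # Heredoc OPEN line: anything that ends with ``<< 'DENG_REJOIN_WRAPPER'``.
--         if s.endswith("<< 'DENG_REJOIN_WRAPPER'"):
--             in_wrapper = True
--             continue
--         # Inline ``echo "...# comment..."`` are fine; only drop lines
--         # that are pure comments.
--         if s.startswith("#"):
--             continue
--         out.append(line)
--     return "\n".join(out)
-- ===== SOURCE B (Python) =====
-- def _strip_comments_and_heredocs(script: str) -> str:
--     lines = iter(script.splitlines())
--     out = []
--     for line in lines:
--         s = line.lstrip()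
--         if s.endswith("<< 'DENG_REJOIN_WRAPPER'"):
--             for inner in lines:
--                 if inner.lstrip() == "DENG_REJOIN_WRAPPER":
--                     break
--             continue
--         if s.startswith("#"):
--             continue
--         out.append(line)
--     return "\n".join(out)
-- ===== Notes on version B (the rewrite author's own statement) =====
-- stated objective: alternative
-- what changed: Replaced the boolean in_wrapper flag state machine with nested consumption over a shared iterator: on a heredoc-open line an inner loop drains lines until the terminator, so no mutable flag is threaded through the main loop.
import Mathlib
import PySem

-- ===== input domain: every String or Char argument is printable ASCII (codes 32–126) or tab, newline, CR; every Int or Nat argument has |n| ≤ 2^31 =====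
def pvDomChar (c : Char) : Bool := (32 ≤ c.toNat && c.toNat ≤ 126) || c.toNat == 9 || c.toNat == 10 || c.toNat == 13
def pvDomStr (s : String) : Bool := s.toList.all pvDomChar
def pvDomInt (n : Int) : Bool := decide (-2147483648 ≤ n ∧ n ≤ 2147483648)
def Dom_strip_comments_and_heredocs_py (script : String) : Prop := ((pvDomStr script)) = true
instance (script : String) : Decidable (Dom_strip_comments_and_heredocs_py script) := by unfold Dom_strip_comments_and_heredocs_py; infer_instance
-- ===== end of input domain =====

-- B replaces A's boolean in_wrapper flag with nested consumption (a skip helper drains the heredoc body); alternative decomposition, same cost.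


-- ===== PORT A =====
-- single fold over the lines threading (out, in_wrapper), exactly A's loop
def stripStepA (st : List String × Bool) (line : String) : List String × Bool :=
  let s := PySem.Str.lstrip line
  if st.2 then
    if s == "DENG_REJOIN_WRAPPER" then (st.1, false) else (st.1, true)
  else if PySem.Str.endswith s "<< 'DENG_REJOIN_WRAPPER'" then (st.1, true)
  else if PySem.Str.startswith s "#" then (st.1, false)
  else (st.1 ++ [line], false)

def strip_comments_and_heredocs_py (script : String) : String :=
  PySem.Str.join "\n" ((PySem.Str.splitlines script).foldl stripStepA ([], false)).1

-- ===== PORT B =====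
-- inner loop: consume lines until the heredoc terminator, return remaining lines
def skipWrapperB : List String → List String
  | [] => []
  | l :: ls => if PySem.Str.lstrip l == "DENG_REJOIN_WRAPPER" then ls else skipWrapperB ls

theorem skipWrapperB_length_le : ∀ ls : List String, (skipWrapperB ls).length ≤ ls.length
  | [] => Nat.le_refl _
  | l :: ls => by
    simp only [skipWrapperB]
    split
    · exact Nat.le_succ _
    · exact Nat.le_trans (skipWrapperB_length_le ls) (Nat.le_succ _)

-- outer loop: on a heredoc-open line hand the rest to skipWrapperB, no flag
def stripLoopB : List String → List String
  | [] => []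
  | l :: ls =>
    let s := PySem.Str.lstrip l
    if PySem.Str.endswith s "<< 'DENG_REJOIN_WRAPPER'" then stripLoopB (skipWrapperB ls)
    else if PySem.Str.startswith s "#" then stripLoopB ls
    else l :: stripLoopB ls
termination_by ls => ls.length
decreasing_by
  · exact Nat.lt_succ_of_le (skipWrapperB_length_le ls)
  · exact Nat.lt_succ_self _
  · exact Nat.lt_succ_self _

def strip_comments_and_heredocs_py_alt (script : String) : String :=
  PySem.Str.join "\n" (stripLoopB (PySem.Str.splitlines script))

-- ===== PRECONDITION & SPEC =====
def Spec_strip_comments_and_heredocs_py (script : String) (out : String) : Prop := out = strip_comments_and_heredocs_py_alt script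
instance (script : String) (out : String) : Decidable (Spec_strip_comments_and_heredocs_py script out) := by unfold Spec_strip_comments_and_heredocs_py; infer_instance

-- ===== CLAIM (what is proved, stated in full; the proofs are below) =====
def Claim_equal_strip_comments_and_heredocs_py : Prop := ∀ (script : String), Dom_strip_comments_and_heredocs_py script → Spec_strip_comments_and_heredocs_py script (strip_comments_and_heredocs_py script)

-- ===== LEMMAS AND PROOFS =====
theorem foldl_stripStepA_eq : ∀ (lines : List String) (acc : List String),
    (lines.foldl stripStepA (acc, false)).1 = acc ++ stripLoopB lines ∧
    (lines.foldl stripStepA (acc, true)).1 = acc ++ stripLoopB (skipWrapperB lines)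
  | [], acc => by simp [stripLoopB, skipWrapperB]
  | l :: ls, acc => by
    constructor
    · show ((ls.foldl stripStepA (stripStepA (acc, false) l))).1 = _
      by_cases h1 : PySem.Str.endswith (PySem.Str.lstrip l) "<< 'DENG_REJOIN_WRAPPER'" = true
      · simp only [stripStepA, stripLoopB, h1, Bool.false_eq_true, if_false, if_true]
        exact (foldl_stripStepA_eq ls acc).2
      · by_cases h2 : PySem.Str.startswith (PySem.Str.lstrip l) "#" = true
        · simp only [stripStepA, stripLoopB, h1, h2, Bool.false_eq_true, if_false, if_true]
          exact (foldl_stripStepA_eq ls acc).1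
        · simp only [stripStepA, stripLoopB, h1, h2, Bool.false_eq_true, if_false]
          rw [(foldl_stripStepA_eq ls (acc ++ [l])).1]
          simp
    · show ((ls.foldl stripStepA (stripStepA (acc, true) l))).1 = _
      by_cases h : (PySem.Str.lstrip l == "DENG_REJOIN_WRAPPER") = true
      · simp only [stripStepA, skipWrapperB, h, if_true]
        exact (foldl_stripStepA_eq ls acc).1
      · simp only [stripStepA, skipWrapperB, h]
        exact (foldl_stripStepA_eq ls acc).2
termination_by lines => lines.length

-- ===== VERDICT (by name: the statement is the Claim_ definition above) =====
theorem strip_comments_and_heredocs_py_spec : Claim_equal_strip_comments_and_heredocs_py := by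
  intro script _
  show _ = _
  unfold strip_comments_and_heredocs_py strip_comments_and_heredocs_py_alt
  rw [(foldl_stripStepA_eq (PySem.Str.splitlines script) []).1]
  rfl
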